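-- pv_equiv track=rewrite | github.com/DieterJoubert/Rosalind_solutions | stronghold/lcsm.py | check
-- ===== SOURCE A (Python) =====
-- def check(term,strings):
--   size = len(term)
--   for s in strings:
--     length = len(s)
--     for i in range(0,length):
--       if s[i:i+size] == term:
--         break
--       if i==length-1:
--         return False
--   return True
-- ===== SOURCE B (Python) =====
-- def check(term, strings):
--     return all(term in s for s in strings)
-- ===== Notes on version B (the rewrite author's own statement) =====
-- stated objective: simpler
-- what changed: Replaces A's explicit per-string index loop over slices (with break/early-return bookkeeping) by a one-line all(...) over the built-in substring test 'term in s'; the empty-string member that A's inner loop silently skips is now correctly rejected (see differs).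
-- intended difference: On inputs where term is nonempty, strings contains the empty string, and every other element contains term, A returns True because its inner loop never runs on an empty string and never reaches 'return False'; B returns False, the intended answer since a nonempty term is not a substring of the empty string. — e.g. on check("a", [""]): A returns true, B returns false
import Mathlib
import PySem

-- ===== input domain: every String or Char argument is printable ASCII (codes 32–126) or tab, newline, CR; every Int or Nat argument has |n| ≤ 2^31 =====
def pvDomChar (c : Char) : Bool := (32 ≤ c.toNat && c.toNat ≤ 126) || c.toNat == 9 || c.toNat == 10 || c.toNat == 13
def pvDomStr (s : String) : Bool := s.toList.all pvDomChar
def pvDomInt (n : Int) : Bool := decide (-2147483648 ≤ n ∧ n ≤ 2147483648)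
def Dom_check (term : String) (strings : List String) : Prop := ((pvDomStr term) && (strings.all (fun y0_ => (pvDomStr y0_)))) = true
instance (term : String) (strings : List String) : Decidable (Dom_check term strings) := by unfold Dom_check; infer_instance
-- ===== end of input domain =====

-- B: simpler — one all(...) over the built-in substring test instead of A's explicit index loop
-- over slices; B also rejects empty strings that A's inner loop silently skips (see D_check).


-- ===== PORT A =====
-- inner 'for i in range(0, length)': true when it breaks or finishes, false on 'return False'
def checkInner (term s : List Char) (size length : Int) : List Int → Bool
  | [] => true
  | i :: rest =>
    if PySem.List.slice s (some i) (some (i + size)) = term then true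
    else if i = length - 1 then false
    else checkInner term s size length rest

-- outer 'for s in strings' loop carrying the early 'return False'
def checkOuter (term : List Char) (size : Int) : List String → Bool
  | [] => true
  | s :: rest =>
    let length : Int := PySem.Str.len s
    if checkInner term s.toList size length (PySem.List.pyRange 0 length 1) then
      checkOuter term size rest
    else false

def check (term : String) (strings : List String) : Bool :=
  checkOuter term.toList (PySem.Str.len term) strings

-- ===== PORT B =====
def check_alt (term : String) (strings : List String) : Bool :=
  strings.all (fun s => PySem.Str.isIn term s)

-- ===== PRECONDITION & SPEC =====
-- On inputs where term is nonempty, strings contains "" and every other element contains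
-- term, A returns True (its inner loop never runs on "" and never reaches 'return False');
-- B returns False, the intended answer: a nonempty term is not a substring of "".
def D_check (term : String) (strings : List String) : Prop :=
  term ≠ "" ∧ "" ∈ strings ∧ ∀ s ∈ strings, s = "" ∨ term.toList <:+: s.toList
instance (term : String) (strings : List String) : Decidable (D_check term strings) := by
  unfold D_check; infer_instance

def Spec_check (term : String) (strings : List String) (out : Bool) : Prop :=
  ¬ D_check term strings → out = check_alt term strings
instance (term : String) (strings : List String) (out : Bool) : Decidable (Spec_check term strings out) := by unfold Spec_check; infer_instance

def pvDiffWitness_check : String × List String := ("a", [""])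
def pvDiffWitnessOut_check : Bool × Bool := (true, false)

-- ===== CLAIM (what is proved, stated in full; the proofs are below) =====
def Claim_unchanged_check : Prop := ∀ (term : String) (strings : List String), Dom_check term strings → Spec_check term strings (check term strings)
def Claim_changed_check : Prop := Dom_check (pvDiffWitness_check.1) (pvDiffWitness_check.2) ∧ D_check (pvDiffWitness_check.1) (pvDiffWitness_check.2) ∧ check (pvDiffWitness_check.1) (pvDiffWitness_check.2) = pvDiffWitnessOut_check.1 ∧ check_alt (pvDiffWitness_check.1) (pvDiffWitness_check.2) = pvDiffWitnessOut_check.2 ∧ pvDiffWitnessOut_check.1 ≠ pvDiffWitnessOut_check.2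
def Claim_exact_check : Prop := ∀ (term : String) (strings : List String), Dom_check term strings → D_check term strings → check term strings ≠ check_alt term strings

-- ===== LEMMAS AND PROOFS =====

-- the inner loop over range(j, len(s)), j ≤ len(s): true iff the range is empty
-- or some position from j onwards starts an occurrence of term
lemma checkInner_range (term s : List Char) (j : Nat) (hj : j ≤ s.length) :
    (checkInner term s (term.length : Int) (s.length : Int)
        (PySem.List.pyRange (j : Int) (s.length : Int) 1) = true) ↔
      (j = s.length ∨ ∃ i, j ≤ i ∧ i < s.length ∧ term <+: s.drop i) := by
  induction hn : s.length - j generalizing j with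
  | zero =>
    have hjs : j = s.length := by omega
    subst hjs
    rw [PySem.List.pyRange_one]
    simp [checkInner]
  | succ n ih =>
    have hjlt : j < s.length := by omega
    have hlt : (j : Int) < (s.length : Int) := by exact_mod_cast hjlt
    rw [PySem.List.pyRange_one_cons hlt]
    by_cases hsl : PySem.List.slice s (some (j : Int)) (some ((j : Int) + (term.length : Int))) = term
    · simp only [checkInner, if_pos hsl]
      have hp : term <+: s.drop j := by
        rw [PySem.List.slice_natCast_add] at hsl
        rw [List.prefix_iff_eq_take]
        exact hsl.symm
      exact ⟨fun _ => Or.inr ⟨j, le_refl _, hjlt, hp⟩, fun _ => by trivial⟩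
    · have hpre : ¬ term <+: s.drop j := by
        intro hp
        exact hsl (by rw [PySem.List.slice_natCast_add]; exact (List.prefix_iff_eq_take.mp hp).symm)
      by_cases hlast : j + 1 = s.length
      · have hje : (j : Int) = (s.length : Int) - 1 := by omega
        simp only [checkInner, if_neg hsl, if_pos hje]
        constructor
        · intro h; exact absurd h (by simp)
        · rintro (h | ⟨i, h1, h2, h3⟩)
          · omega
          · have : i = j := by omega
            exact absurd (this ▸ h3) hpre
      · have hne : ¬ ((j : Int) = (s.length : Int) - 1) := by omega
        simp only [checkInner, if_neg hsl, if_neg hne]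
        have hcast : (j : Int) + 1 = ((j + 1 : Nat) : Int) := by push_cast; ring
        rw [hcast, ih (j + 1) (by omega) (by omega)]
        constructor
        · rintro (h | ⟨i, h1, h2, h3⟩)
          · omega
          · exact Or.inr ⟨i, by omega, h2, h3⟩
        · rintro (h | ⟨i, h1, h2, h3⟩)
          · omega
          · rcases Nat.eq_or_lt_of_le h1 with heq | hgt
            · exact absurd (heq ▸ h3) hpre
            · exact Or.inr ⟨i, hgt, h2, h3⟩

-- on a nonempty string the inner loop computes exactly 'term in s'
lemma checkInner_isIn (term s : List Char) (hs : s ≠ []) :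
    checkInner term s (term.length : Int) (s.length : Int)
        (PySem.List.pyRange 0 (s.length : Int) 1) = PySem.Chars.isIn term s := by
  have h0 : ((0 : Nat) : Int) = (0 : Int) := rfl
  rw [Bool.eq_iff_iff, ← h0, checkInner_range term s 0 (Nat.zero_le _)]
  rw [← PySem.Chars.exists_prefix_drop_iff_isIn]
  constructor
  · rintro (h | ⟨i, _, _, h3⟩)
    · have := List.length_pos_of_ne_nil hs; omega
    · exact ⟨i, h3⟩
  · rintro ⟨i, hi⟩
    by_cases hilt : i < s.length
    · exact Or.inr ⟨i, Nat.zero_le _, hilt, hi⟩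
    · have : s.drop i = [] := List.drop_eq_nil_of_le (by omega)
      have hterm : term = [] := List.prefix_nil.mp (this ▸ hi)
      exact Or.inr ⟨0, le_refl _, List.length_pos_of_ne_nil hs, hterm ▸ List.nil_prefix⟩

-- A computes: every string is empty or contains term
lemma check_eq (term : String) (strings : List String) :
    check term strings =
      strings.all (fun s => (s == "") || PySem.Chars.isIn term.toList s.toList) := by
  unfold check
  induction strings with
  | nil => rfl
  | cons s rest ih =>
    have hlen : PySem.Str.len s = (s.toList.length : Int) := by simp [pysem]
    have hsize : PySem.Str.len term = (term.toList.length : Int) := by simp [pysem]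
    have hsize2 : PySem.Str.len term = (term.length : Int) := by simp [pysem]
    rw [hsize2] at ih
    simp only [checkOuter, hlen, hsize, List.all_cons]
    by_cases hs : s.toList = []
    · have hse : s = "" := String.toList_eq_nil_iff.mp hs
      rw [hs]
      simp only [List.length_nil, Nat.cast_zero, PySem.List.pyRange_one]
      simp [checkInner, hse, ih]
    · rw [checkInner_isIn term.toList s.toList hs]
      have hne : (s == "") = false := by
        simp only [beq_eq_false_iff_ne, ne_eq]
        intro h; exact hs (String.toList_eq_nil_iff.mpr h)
      cases hin : PySem.Chars.isIn term.toList s.toList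
      · simp [hne]
      · simp [hne, ih]

-- B computes: every string contains term
lemma check_alt_eq (term : String) (strings : List String) :
    check_alt term strings = strings.all (fun s => PySem.Chars.isIn term.toList s.toList) := by
  unfold check_alt
  simp [pysem]

-- ===== VERDICT (by name: the statements are the Claim_ definitions above) =====
theorem check_spec : Claim_unchanged_check := by
  intro term strings _ hD
  rw [check_eq, check_alt_eq]
  by_cases hterm : term = ""
  · subst hterm
    have h2 : strings.all (fun s => PySem.Chars.isIn ("" : String).toList s.toList) = true := by
      rw [List.all_eq_true]; intro s _
      exact PySem.Chars.isIn_nil s.toList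
    rw [h2, List.all_eq_true]
    intro s _
    simp [PySem.Chars.isIn_nil]
  · cases h1 : strings.all (fun s => PySem.Chars.isIn term.toList s.toList) with
    | true =>
      rw [List.all_eq_true] at h1 ⊢
      intro s hsmem
      rw [Bool.or_eq_true_iff]
      exact Or.inr (h1 s hsmem)
    | false =>
      rw [List.all_eq_false] at h1
      obtain ⟨s0, hmem0, hq0⟩ := h1
      rw [Bool.not_eq_true] at hq0
      by_cases hs0 : s0 = ""
      · cases h2 : strings.all (fun s => (s == "") || PySem.Chars.isIn term.toList s.toList) with
        | false => rfl
        | true =>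
          exfalso
          apply hD
          rw [List.all_eq_true] at h2
          refine ⟨hterm, hs0 ▸ hmem0, fun s hsm => ?_⟩
          rcases Bool.or_eq_true_iff.mp (h2 s hsm) with h | h
          · exact Or.inl (beq_iff_eq.mp h)
          · exact Or.inr ((PySem.Chars.isIn_iff_infix _ _).mp h)
      · rw [List.all_eq_false]
        exact ⟨s0, hmem0, by simp [hs0, hq0]⟩

theorem check_changed : Claim_changed_check := by
  unfold Claim_changed_check; decide

theorem check_tight : Claim_exact_check := by
  intro term strings _ hD
  obtain ⟨hterm, hmem, hall⟩ := hD
  rw [check_eq, check_alt_eq]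
  have hA : strings.all (fun s => (s == "") || PySem.Chars.isIn term.toList s.toList) = true := by
    rw [List.all_eq_true]
    intro s hsmem
    rw [Bool.or_eq_true_iff]
    rcases hall s hsmem with h | h
    · exact Or.inl (beq_iff_eq.mpr h)
    · exact Or.inr ((PySem.Chars.isIn_iff_infix _ _).mpr h)
  have hB : strings.all (fun s => PySem.Chars.isIn term.toList s.toList) = false := by
    rw [List.all_eq_false]
    refine ⟨"", hmem, ?_⟩
    rw [Bool.not_eq_true, PySem.Chars.isIn_eq_false_iff]
    intro hinf
    have : term.toList = [] := List.eq_nil_of_infix_nil (by simpa using hinf)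
    exact hterm (String.toList_eq_nil_iff.mp this)
  rw [hA, hB]
  simp
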